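-- pv_equiv track=rewrite | github.com/Ravenshaw3/watch-media-server | subtitle_service.py | convert_vtt_to_srt
-- ===== SOURCE A (Python) =====
-- def convert_vtt_to_srt(vtt_content: str) -> str:
--     """Convert VTT subtitle content to SRT format"""
--     lines = vtt_content.strip().split('\n')
--     srt_lines = []
--     sequence = 1
--
--     i = 0
--     while i < len(lines):
--         line = lines[i].strip()
--
--         # Skip WEBVTT header
--         if line == 'WEBVTT' or not line:
--             i += 1
--             continue
--
--         # Process timestamp line
--         if '-->' in line:
--             # Convert VTT timestamp format to SRT
--             timestamp = line.replace('.', ',')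
--             srt_lines.append(str(sequence))
--             srt_lines.append(timestamp)
--             sequence += 1
--             i += 1
--
--             # Collect subtitle text
--             subtitle_text = []
--             while i < len(lines) and lines[i].strip():
--                 subtitle_text.append(lines[i].strip())
--                 i += 1
--
--             if subtitle_text:
--                 srt_lines.append('\n'.join(subtitle_text))
--                 srt_lines.append('')
--         else:
--             i += 1
--
--     return '\n'.join(srt_lines)
-- ===== SOURCE B (Python) =====
-- def convert_vtt_to_srt(vtt_content: str) -> str:
--     """Convert VTT subtitle content to SRT format (block-based rewrite)"""
--     lines = vtt_content.strip().split('\n')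
--     # group stripped lines into blocks separated by blank lines
--     blocks = []
--     cur = []
--     for line in lines:
--         s = line.strip()
--         if s:
--             cur.append(s)
--         elif cur:
--             blocks.append(cur)
--             cur = []
--     if cur:
--         blocks.append(cur)
--     srt_lines = []
--     seq = 1
--     for block in blocks:
--         idx = next((j for j, s in enumerate(block) if '-->' in s), None)
--         if idx is None:
--             continue
--         srt_lines.append(str(seq))
--         srt_lines.append(block[idx].replace('.', ','))
--         seq += 1
--         text = block[idx + 1:]
--         if text:
--             srt_lines.append('\n'.join(text))
--             srt_lines.append('')
--     return '\n'.join(srt_lines)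
-- ===== Notes on version B (the rewrite author's own statement) =====
-- stated objective: simpler
-- what changed: Replaces A's single index-driven while loop (with a nested inner while and manual index bookkeeping) by a two-phase decomposition: first group the stripped lines into blank-separated blocks, then emit one SRT cue per block that contains a timestamp line.
import Mathlib
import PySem

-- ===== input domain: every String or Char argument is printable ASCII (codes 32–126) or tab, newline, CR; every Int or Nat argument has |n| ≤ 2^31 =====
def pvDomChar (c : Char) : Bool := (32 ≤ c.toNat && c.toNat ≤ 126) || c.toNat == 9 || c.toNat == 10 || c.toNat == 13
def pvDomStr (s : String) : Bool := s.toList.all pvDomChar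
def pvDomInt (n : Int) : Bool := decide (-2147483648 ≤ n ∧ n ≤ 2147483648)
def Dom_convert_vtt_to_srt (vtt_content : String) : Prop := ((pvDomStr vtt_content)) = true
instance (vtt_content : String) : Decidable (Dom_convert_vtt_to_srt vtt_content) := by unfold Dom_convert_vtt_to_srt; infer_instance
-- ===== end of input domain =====

-- B replaces A's index-driven while loop by a two-phase decomposition (group lines
-- into blank-separated blocks, then emit one cue per block); objective: simpler.

-- shared exact primitive: s.split('\n') (sep is the non-empty literal, so split? is some)
def pvSplitNL (s : String) : List String := (PySem.Str.split? s "\n").getD []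

-- ===== PORT A =====
-- inner while loop: collect consecutive non-blank (stripped) lines, return (text, remaining)
def pvCollectA : List String → List String × List String
  | [] => ([], [])
  | l :: rest =>
    if PySem.Str.strip l ≠ "" then
      let p := pvCollectA rest
      (PySem.Str.strip l :: p.1, p.2)
    else ([], l :: rest)

theorem pvCollectA_snd_length (ls : List String) : (pvCollectA ls).2.length ≤ ls.length := by
  induction ls with
  | nil => simp [pvCollectA]
  | cons l rest ih =>
    simp only [pvCollectA]
    split
    · exact le_trans ih (Nat.le_succ _)
    · simp

def pvLoopA : List String → List String → Int → List String
  | [], srt, _ => srt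
  | l :: rest, srt, seq =>
    let line := PySem.Str.strip l
    if line = "WEBVTT" ∨ line = "" then pvLoopA rest srt seq
    else if PySem.Str.isIn "-->" line then
      let tr := pvCollectA rest
      let srt1 := srt ++ [PySem.Int.toStr seq, PySem.Str.replace line "." ","]
      let srt2 := if tr.1 ≠ [] then srt1 ++ [PySem.Str.join "\n" tr.1, ""] else srt1
      pvLoopA tr.2 srt2 (seq + 1)
    else pvLoopA rest srt seq
termination_by ls _ _ => ls.length
decreasing_by
  · simp
  · exact Nat.lt_succ_of_le (pvCollectA_snd_length rest)
  · simp

def convert_vtt_to_srt (vtt_content : String) : String :=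
  PySem.Str.join "\n" (pvLoopA (pvSplitNL (PySem.Str.strip vtt_content)) [] 1)

-- ===== PORT B =====
-- phase 1: fold lines into blank-separated blocks of stripped lines
def pvBlockStep (acc : List (List String) × List String) (line : String) :
    List (List String) × List String :=
  let s := PySem.Str.strip line
  if s ≠ "" then (acc.1, acc.2 ++ [s])
  else if acc.2 ≠ [] then (acc.1 ++ [acc.2], []) else acc

-- first line of the block containing '-->' (Python's next(...enumerate...))
def pvFindTs (block : List String) : Option Nat :=
  block.findIdx? (fun s => PySem.Str.isIn "-->" s)

-- phase 2: emit one SRT cue per block that has a timestamp line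
def pvCueStep (acc : List String × Int) (block : List String) : List String × Int :=
  match pvFindTs block with
  | none => acc
  | some idx =>
    let srt1 := acc.1 ++ [PySem.Int.toStr acc.2, PySem.Str.replace (block.getD idx "") "." ","]
    let text := block.drop (idx + 1)
    (if text ≠ [] then srt1 ++ [PySem.Str.join "\n" text, ""] else srt1, acc.2 + 1)

def convert_vtt_to_srt_alt (vtt_content : String) : String :=
  let lines := pvSplitNL (PySem.Str.strip vtt_content)
  let p := lines.foldl pvBlockStep ([], [])
  let blocks := if p.2 ≠ [] then p.1 ++ [p.2] else p.1
  PySem.Str.join "\n" (blocks.foldl pvCueStep ([], 1)).1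

-- ===== PRECONDITION & SPEC =====
def Spec_convert_vtt_to_srt (vtt_content : String) (out : String) : Prop := out = convert_vtt_to_srt_alt vtt_content
instance (vtt_content : String) (out : String) : Decidable (Spec_convert_vtt_to_srt vtt_content out) := by unfold Spec_convert_vtt_to_srt; infer_instance

-- ===== CLAIM (what is proved, stated in full; the proofs are below) =====
def Claim_equal_convert_vtt_to_srt : Prop := ∀ (vtt_content : String), Dom_convert_vtt_to_srt vtt_content → Spec_convert_vtt_to_srt vtt_content (convert_vtt_to_srt vtt_content)

-- ===== LEMMAS AND PROOFS =====

-- recursive form of B's grouping fold, with the pending block `cur` explicit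
def pvGb (cur : List String) : List String → List (List String)
  | [] => if cur ≠ [] then [cur] else []
  | l :: rest =>
    if PySem.Str.strip l ≠ "" then pvGb (cur ++ [PySem.Str.strip l]) rest
    else if cur ≠ [] then cur :: pvGb [] rest else pvGb [] rest

-- recursive form of B's cue fold
def pvPb : List (List String) → Int → List String
  | [], _ => []
  | b :: bs, seq =>
    match pvFindTs b with
    | none => pvPb bs seq
    | some idx =>
      ([PySem.Int.toStr seq, PySem.Str.replace (b.getD idx "") "." ","] ++
        (if b.drop (idx + 1) ≠ [] then [PySem.Str.join "\n" (b.drop (idx + 1)), ""] else [])) ++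
      pvPb bs (seq + 1)

theorem foldl_pvBlockStep (lines : List String) : ∀ (bs : List (List String)) (cur : List String),
    (if (lines.foldl pvBlockStep (bs, cur)).2 ≠ [] then
        (lines.foldl pvBlockStep (bs, cur)).1 ++ [(lines.foldl pvBlockStep (bs, cur)).2]
      else (lines.foldl pvBlockStep (bs, cur)).1) = bs ++ pvGb cur lines := by
  induction lines with
  | nil =>
    intro bs cur
    simp only [List.foldl_nil, pvGb]
    split <;> simp_all
  | cons l rest ih =>
    intro bs cur
    rw [List.foldl_cons]
    by_cases h : PySem.Str.strip l ≠ ""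
    · rw [show pvBlockStep (bs, cur) l = (bs, cur ++ [PySem.Str.strip l]) by
        simp [pvBlockStep, h]]
      rw [ih, show pvGb cur (l :: rest) = pvGb (cur ++ [PySem.Str.strip l]) rest by
        simp [pvGb, h]]
    · push_neg at h
      by_cases hc : cur = []
      · subst hc
        rw [show pvBlockStep (bs, []) l = (bs, []) by simp [pvBlockStep, h]]
        rw [ih, show pvGb [] (l :: rest) = pvGb [] rest by simp [pvGb, h]]
      · rw [show pvBlockStep (bs, cur) l = (bs ++ [cur], []) by simp [pvBlockStep, h, hc]]
        rw [ih, show pvGb cur (l :: rest) = cur :: pvGb [] rest by simp [pvGb, h, hc]]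
        simp

theorem foldl_pvCueStep (bs : List (List String)) : ∀ (srt : List String) (seq : Int),
    (bs.foldl pvCueStep (srt, seq)).1 = srt ++ pvPb bs seq := by
  induction bs with
  | nil => intro srt seq; simp [pvPb]
  | cons b rest ih =>
    intro srt seq
    rw [List.foldl_cons]
    cases h : pvFindTs b with
    | none =>
      rw [show pvCueStep (srt, seq) b = (srt, seq) by simp [pvCueStep, h]]
      rw [ih, show pvPb (b :: rest) seq = pvPb rest seq by simp [pvPb, h]]
    | some idx =>
      rw [show pvCueStep (srt, seq) b =
          ((if b.drop (idx + 1) ≠ [] then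
              (srt ++ [PySem.Int.toStr seq, PySem.Str.replace (b.getD idx "") "." ","]) ++
                [PySem.Str.join "\n" (b.drop (idx + 1)), ""]
            else srt ++ [PySem.Int.toStr seq, PySem.Str.replace (b.getD idx "") "." ","]), seq + 1) by
        simp [pvCueStep, h]]
      rw [ih, show pvPb (b :: rest) seq =
          ([PySem.Int.toStr seq, PySem.Str.replace (b.getD idx "") "." ","] ++
            (if b.drop (idx + 1) ≠ [] then [PySem.Str.join "\n" (b.drop (idx + 1)), ""] else [])) ++
          pvPb rest (seq + 1) by simp [pvPb, h]]
      split <;> simp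

-- dropping a non-timestamp head line from the first block does not change the cues
theorem pvPb_dropHead (s : String) (b : List String) (bs : List (List String)) (seq : Int)
    (h : PySem.Str.isIn "-->" s = false) :
    pvPb ((s :: b) :: bs) seq = pvPb (b :: bs) seq := by
  have hcons : pvFindTs (s :: b) = Option.map (· + 1) (pvFindTs b) := by
    unfold pvFindTs
    simp only [List.findIdx?_cons, h]
    simp
  cases hf : pvFindTs b with
  | none => simp [pvPb, hcons, hf]
  | some idx =>
    simp only [pvPb, hcons, hf, Option.map_some]
    simp [List.getD_cons_succ, List.drop_succ_cons]

-- a timestamp-headed block emits one cue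
theorem pvPb_ts_head (t : String) (T : List String) (bs : List (List String)) (seq : Int)
    (h : PySem.Str.isIn "-->" t = true) :
    pvPb ((t :: T) :: bs) seq =
      ([PySem.Int.toStr seq, PySem.Str.replace t "." ","] ++
        (if T ≠ [] then [PySem.Str.join "\n" T, ""] else [])) ++ pvPb bs (seq + 1) := by
  have hf : pvFindTs (t :: T) = some 0 := by
    unfold pvFindTs
    simp only [List.findIdx?_cons, h]
    simp
  simp only [pvPb, hf]
  simp [List.getD_cons_zero]

-- an empty first block contributes nothing
theorem pvPb_nil_head (bs : List (List String)) (seq : Int) :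
    pvPb ([] :: bs) seq = pvPb bs seq := by
  simp [pvPb, pvFindTs]

-- pvCollectA computes the stripped take/drop of the leading non-blank run
theorem pvCollectA_spec (ls : List String) :
    pvCollectA ls = (((ls.takeWhile (fun x => PySem.Str.strip x ≠ "")).map PySem.Str.strip),
      ls.dropWhile (fun x => PySem.Str.strip x ≠ "")) := by
  induction ls with
  | nil => simp [pvCollectA]
  | cons l rest ih =>
    by_cases h : PySem.Str.strip l ≠ ""
    · simp [pvCollectA, h, ih, List.takeWhile_cons, List.dropWhile_cons]
    · push_neg at h
      simp [pvCollectA, List.takeWhile_cons, List.dropWhile_cons, h]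

-- splitting off the leading non-blank run in pvGb
theorem pvGb_cur (ls : List String) : ∀ (cur : List String), cur ≠ [] →
    pvGb cur ls = (cur ++ (ls.takeWhile (fun x => PySem.Str.strip x ≠ "")).map PySem.Str.strip)
      :: pvGb [] (ls.dropWhile (fun x => PySem.Str.strip x ≠ "")) := by
  induction ls with
  | nil => intro cur hc; simp [pvGb, hc]
  | cons l rest ih =>
    intro cur hc
    by_cases h : PySem.Str.strip l ≠ ""
    · rw [show pvGb cur (l :: rest) = pvGb (cur ++ [PySem.Str.strip l]) rest by simp [pvGb, h]]
      rw [ih (cur ++ [PySem.Str.strip l]) (by simp)]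
      simp [List.takeWhile_cons, List.dropWhile_cons, h]
    · push_neg at h
      simp [pvGb, List.takeWhile_cons, List.dropWhile_cons, h, hc]

-- absorbing the leading run as the first block keeps the cue list
theorem pvPb_pvGb_run (rest : List String) (seq : Int) :
    pvPb (pvGb [] rest) seq =
    pvPb (((rest.takeWhile (fun x => PySem.Str.strip x ≠ "")).map PySem.Str.strip)
      :: pvGb [] (rest.dropWhile (fun x => PySem.Str.strip x ≠ ""))) seq := by
  cases rest with
  | nil => simp [pvGb, pvPb_nil_head]
  | cons r rest2 =>
    by_cases h : PySem.Str.strip r ≠ ""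
    · rw [show pvGb [] (r :: rest2) = pvGb ([] ++ [PySem.Str.strip r]) rest2 by simp [pvGb, h]]
      rw [pvGb_cur rest2 _ (by simp)]
      simp [List.takeWhile_cons, List.dropWhile_cons, h]
    · push_neg at h
      rw [show pvGb [] (r :: rest2) = pvGb [] rest2 by simp [pvGb, h]]
      rw [show (r :: rest2).takeWhile (fun x => PySem.Str.strip x ≠ "") = [] by
        simp [List.takeWhile_cons, h]]
      rw [show (r :: rest2).dropWhile (fun x => PySem.Str.strip x ≠ "") = r :: rest2 by
        simp [List.dropWhile_cons, h]]
      rw [List.map_nil, pvPb_nil_head]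
      rw [show pvGb [] (r :: rest2) = pvGb [] rest2 by simp [pvGb, h]]

-- main loop correspondence: A's while loop = B's cues over B's blocks
theorem pvLoopA_eq_aux (n : Nat) : ∀ (lines srt : List String) (seq : Int), lines.length ≤ n →
    pvLoopA lines srt seq = srt ++ pvPb (pvGb [] lines) seq := by
  induction n with
  | zero =>
    intro lines srt seq hlen
    rw [Nat.le_zero, List.length_eq_zero_iff] at hlen
    subst hlen
    simp [pvLoopA, pvGb, pvPb]
  | succ n ih =>
    intro lines srt seq hlen
    cases lines with
    | nil => simp [pvLoopA, pvGb, pvPb]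
    | cons l rest =>
      simp only [List.length_cons, Nat.succ_le_succ_iff] at hlen
      by_cases hskip : PySem.Str.strip l = "WEBVTT" ∨ PySem.Str.strip l = ""
      · rw [show pvLoopA (l :: rest) srt seq = pvLoopA rest srt seq by
          simp only [pvLoopA]; rw [if_pos hskip]]
        rw [ih rest srt seq hlen]
        rcases hskip with hw | he
        · have hne : PySem.Str.strip l ≠ "" := by rw [hw]; decide
          rw [show pvGb [] (l :: rest) = pvGb [PySem.Str.strip l] rest by
            simp [pvGb, hne]]
          rw [pvGb_cur rest [PySem.Str.strip l] (by simp), List.singleton_append]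
          rw [pvPb_dropHead _ _ _ _ (by rw [hw]; decide)]
          rw [← pvPb_pvGb_run]
        · rw [show pvGb [] (l :: rest) = pvGb [] rest by simp [pvGb, he]]
      · push_neg at hskip
        by_cases hts : PySem.Str.isIn "-->" (PySem.Str.strip l) = true
        · -- timestamp line heads the block
          rw [show pvLoopA (l :: rest) srt seq =
              pvLoopA (rest.dropWhile (fun x => PySem.Str.strip x ≠ ""))
                (if ((rest.takeWhile (fun x => PySem.Str.strip x ≠ "")).map PySem.Str.strip) ≠ [] then
                    (srt ++ [PySem.Int.toStr seq, PySem.Str.replace (PySem.Str.strip l) "." ","]) ++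
                      [PySem.Str.join "\n"
                        ((rest.takeWhile (fun x => PySem.Str.strip x ≠ "")).map PySem.Str.strip), ""]
                  else srt ++ [PySem.Int.toStr seq, PySem.Str.replace (PySem.Str.strip l) "." ","])
                (seq + 1) by
            simp only [pvLoopA]
            rw [if_neg (by rintro (h1 | h2); exact hskip.1.elim h1; exact hskip.2.elim h2),
              if_pos hts, pvCollectA_spec]]
          rw [ih _ _ _ (le_trans (List.length_dropWhile_le _ _) hlen)]
          rw [show pvGb [] (l :: rest) = pvGb [PySem.Str.strip l] rest by
            simp [pvGb, hskip.2]]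
          rw [pvGb_cur rest [PySem.Str.strip l] (by simp), List.singleton_append]
          rw [pvPb_ts_head _ _ _ _ hts]
          by_cases hc :
              ((rest.takeWhile (fun x => PySem.Str.strip x ≠ "")).map PySem.Str.strip) = []
          · rw [if_neg (fun hh => hh hc), if_neg (fun hh => hh hc)]
            simp
          · rw [if_pos hc, if_pos hc]
            simp
        · -- ordinary line: skipped by A, a cueless block head for B
          rw [show pvLoopA (l :: rest) srt seq = pvLoopA rest srt seq by
            simp only [pvLoopA]
            rw [if_neg (by rintro (h1 | h2); exact hskip.1.elim h1; exact hskip.2.elim h2),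
              if_neg hts]]
          rw [ih rest srt seq hlen]
          rw [show pvGb [] (l :: rest) = pvGb [PySem.Str.strip l] rest by
            simp [pvGb, hskip.2]]
          rw [pvGb_cur rest [PySem.Str.strip l] (by simp), List.singleton_append]
          rw [pvPb_dropHead _ _ _ _ (by simpa using hts)]
          rw [← pvPb_pvGb_run]

theorem pvLoopA_eq (lines srt : List String) (seq : Int) :
    pvLoopA lines srt seq = srt ++ pvPb (pvGb [] lines) seq :=
  pvLoopA_eq_aux lines.length lines srt seq le_rfl

-- ===== VERDICT (by name: the statement is the Claim_ definition above) =====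
theorem convert_vtt_to_srt_spec : Claim_equal_convert_vtt_to_srt := by
  intro v _
  unfold Spec_convert_vtt_to_srt convert_vtt_to_srt convert_vtt_to_srt_alt
  rw [pvLoopA_eq]
  have hb := foldl_pvBlockStep (pvSplitNL (PySem.Str.strip v)) [] []
  rw [List.nil_append] at hb
  simp only [foldl_pvCueStep, hb, List.nil_append]
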